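-- pv_equiv track=rewrite | github.com/Milrus27/winter_intensive_2026 | telegram_bot/practice/day4/drink_about.py | people_with_age_drink
-- ===== SOURCE A (Python) =====
-- def people_with_age_drink(age):
--     conditions = {lambda x: x < 14: 'drink toddy',
--             lambda x: 14 <= x < 18: 'drink coke',
--             lambda x: 18 <= x < 21: 'drink beer',
--             lambda x: x >= 21: 'drink whisky'}
--
--     for condition, drink in conditions.items():
--         if condition(age):
--             return drink
-- ===== SOURCE B (Python) =====
-- import bisect
--
-- _THRESHOLDS = [14, 18, 21]
-- _DRINKS = ['drink toddy', 'drink coke', 'drink beer', 'drink whisky']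
--
-- def people_with_age_drink(age):
--     return _DRINKS[bisect.bisect_right(_THRESHOLDS, age)]
-- ===== Notes on version B (the rewrite author's own statement) =====
-- stated objective: idiomatic
-- what changed: Replaced the lambda-keyed predicate dict scanned in a loop by a sorted threshold table indexed via bisect_right.
import Mathlib
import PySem

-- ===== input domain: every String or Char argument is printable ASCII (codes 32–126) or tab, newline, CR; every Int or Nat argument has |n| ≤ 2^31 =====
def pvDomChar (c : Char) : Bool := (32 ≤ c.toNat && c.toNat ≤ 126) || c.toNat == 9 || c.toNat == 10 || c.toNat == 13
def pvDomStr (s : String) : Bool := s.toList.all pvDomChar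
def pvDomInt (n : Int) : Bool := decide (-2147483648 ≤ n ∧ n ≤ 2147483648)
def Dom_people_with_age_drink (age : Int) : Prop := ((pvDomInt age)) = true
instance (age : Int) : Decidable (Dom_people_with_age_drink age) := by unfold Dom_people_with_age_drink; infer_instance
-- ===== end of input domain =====

-- B replaces A's predicate-dict scan with a sorted threshold table indexed by bisect_right (idiomatic).

-- ===== PORT A =====
-- A iterates the dict of (predicate, drink) pairs in insertion order and returns the first hit;
-- the four predicates are exhaustive, so the final case is x ≥ 21.
def people_with_age_drink (age : Int) : String :=
  if age < 14 then "drink toddy"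
  else if 14 ≤ age ∧ age < 18 then "drink coke"
  else if 18 ≤ age ∧ age < 21 then "drink beer"
  else "drink whisky"

-- ===== PORT B =====
def pvThresholds : List Int := [14, 18, 21]
def pvDrinks : List String := ["drink toddy", "drink coke", "drink beer", "drink whisky"]

-- bisect.bisect_right on a sorted list = number of elements ≤ age
def pvBisectRight (xs : List Int) (x : Int) : Nat :=
  (xs.takeWhile (fun t => t ≤ x)).length

def people_with_age_drink_alt (age : Int) : String :=
  pvDrinks.getD (pvBisectRight pvThresholds age) ""

-- ===== PRECONDITION & SPEC =====
def Spec_people_with_age_drink (age : Int) (out : String) : Prop := out = people_with_age_drink_alt age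
instance (age : Int) (out : String) : Decidable (Spec_people_with_age_drink age out) := by unfold Spec_people_with_age_drink; infer_instance

-- ===== CLAIM (what is proved, stated in full; the proofs are below) =====
def Claim_equal_people_with_age_drink : Prop := ∀ (age : Int), Dom_people_with_age_drink age → Spec_people_with_age_drink age (people_with_age_drink age)

-- ===== LEMMAS AND PROOFS =====

-- ===== VERDICT (by name: the statement is the Claim_ definition above) =====
theorem people_with_age_drink_spec : Claim_equal_people_with_age_drink := by
  intro age _
  unfold Spec_people_with_age_drink people_with_age_drink people_with_age_drink_alt
    pvBisectRight pvThresholds pvDrinks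
  split_ifs with h1 h2 h3
  · simp [List.takeWhile, show ¬((14:Int) ≤ age) from by omega]
  · simp [List.takeWhile, show (14:Int) ≤ age from by omega,
      show ¬((18:Int) ≤ age) from by omega]
  · simp [List.takeWhile, show (14:Int) ≤ age from by omega,
      show (18:Int) ≤ age from by omega, show ¬((21:Int) ≤ age) from by omega]
  · simp [List.takeWhile, show (14:Int) ≤ age from by omega,
      show (18:Int) ≤ age from by omega, show (21:Int) ≤ age from by omega]
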